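-- pv_equiv track=rewrite | github.com/ika-rwth-aachen/omega_format | omega_format/converters/from_asam_opendrive/opendriveconverter/elements/junction.py | lookup_table_search_section
-- ===== SOURCE A (Python) =====
-- def lookup_table_search_section(opendrive_road_id, opendrive_lane_section_id_original, opendrive_lane_section_id_search,
--                                 opendrive_lane_id, lookup_table, first_run):
--     """
--     look for VVM road id and VVM lane id that corresponds with the given opendrive road id, lane section id_search and
--     lane id.
--     section search is needed if searching for the lane within the road (in different lane section)
--     search should not output the original lane we are looking for predecessors/successors for in the first place
--     :param opendrive_road_id:
--     :param opendrive_lane_section_id_original: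
--     :param opendrive_lane_section_id_search:
--     :param opendrive_lane_id:
--     :param lookup_table:
--     :param first_run:
--     :return: if found, the row number, if nothing was found - nothing is returned
--     """
--     counter = -1
--     for row in lookup_table:
--         counter += 1
--         if row[0] == opendrive_road_id:
--             if row[1] == opendrive_lane_section_id_search and row[1] != opendrive_lane_section_id_original:
--                 if row[2] == opendrive_lane_id:
--                     # found lane, return counter (row number)
--                     return counter
--
--     # if not found check if lane is in different lane section (work around solution, since not clear how to find out
--     # beforehand in which road section lane is check if road has different lane sections
--     if first_run:
--         max_lane_section = find_max_lane_section(opendrive_road_id, lookup_table)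
--         # forward search first
--         if opendrive_lane_section_id_original < opendrive_lane_section_id_search:
--             # run function for all found lane sections (forward search)
--             for i in range(opendrive_lane_section_id_search + 1, max_lane_section + 1):
--                 # forward search
--                 row_number = lookup_table_search_section(opendrive_road_id, opendrive_lane_section_id_original, i,
--                                                          opendrive_lane_id, lookup_table,
--                                                          False)
--                 if row_number is not None:
--                     return row_number
--             for i in range(opendrive_lane_section_id_search - 1, -1, -1):
--                 # backward search
--                 row_number = lookup_table_search_section(opendrive_road_id, opendrive_lane_section_id_original, i,
--                                                          opendrive_lane_id, lookup_table,
--                                                          False)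
--                 if row_number is not None:
--                     return row_number
--
--         # backward search first
--         if opendrive_lane_section_id_original > opendrive_lane_section_id_search:
--             for i in range(opendrive_lane_section_id_search - 1, -1, -1):
--                 # backward search
--                 row_number = lookup_table_search_section(opendrive_road_id, opendrive_lane_section_id_original, i,
--                                                          opendrive_lane_id, lookup_table,
--                                                          False)
--                 if row_number is not None:
--                     return row_number
--             for i in range(opendrive_lane_section_id_search + 1, max_lane_section + 1):
--                 # forward search
--                 row_number = lookup_table_search_section(opendrive_road_id, opendrive_lane_section_id_original, i,
--                                                          opendrive_lane_id, lookup_table,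
--                                                          False)
--                 if row_number is not None:
--                     return row_number
--
--     return None
--
-- def find_max_lane_section(opendrive_road_id, lookup_table):
--     """
--     finds the maximum amount of lane sections for a certain road
--     :param opendrive_road_id:
--     :param lookup_table:
--     :return:
--     """
--     max_lane_section = 0
--     for row in lookup_table:
--         if row[0] == opendrive_road_id:
--             if row[1] > max_lane_section:
--                 max_lane_section = row[1]
--     return max_lane_section
-- ===== SOURCE B (Python) =====
-- def lookup_table_search_section(opendrive_road_id, opendrive_lane_section_id_original, opendrive_lane_section_id_search,
--                                 opendrive_lane_id, lookup_table, first_run):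
--     """One pass builds a section -> first-matching-row-index hash map (and the road's max
--     section); the search and every fallback candidate become O(1) dictionary lookups."""
--     index = {}
--     max_lane_section = 0
--     for i, row in enumerate(lookup_table):
--         if row[0] == opendrive_road_id:
--             if row[1] > max_lane_section:
--                 max_lane_section = row[1]
--             if row[2] == opendrive_lane_id and row[1] != opendrive_lane_section_id_original and row[1] not in index:
--                 index[row[1]] = i
--     if opendrive_lane_section_id_search in index:
--         return index[opendrive_lane_section_id_search]
--     if not first_run:
--         return None
--     if opendrive_lane_section_id_original < opendrive_lane_section_id_search:
--         candidates = list(range(opendrive_lane_section_id_search + 1, max_lane_section + 1)) + \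
--                      list(range(opendrive_lane_section_id_search - 1, -1, -1))
--     elif opendrive_lane_section_id_original > opendrive_lane_section_id_search:
--         candidates = list(range(opendrive_lane_section_id_search - 1, -1, -1)) + \
--                      list(range(opendrive_lane_section_id_search + 1, max_lane_section + 1))
--     else:
--         return None
--     for section in candidates:
--         if section in index:
--             return index[section]
--     return None
-- ===== Notes on version B (the rewrite author's own statement) =====
-- stated objective: alternative
-- what changed: A rescans the whole table once per candidate section (self-recursion gated on first_run); B makes a single pass that builds a section->first-row-index dictionary plus the road's max section, after which the search and every fallback candidate are O(1) dictionary lookups.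
-- outside the precondition, e.g. on lookup_table_search_section(1, 0, 2, 5, [[1, 2, 5], []], False): A returns 0, B raises IndexError
import Mathlib
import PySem

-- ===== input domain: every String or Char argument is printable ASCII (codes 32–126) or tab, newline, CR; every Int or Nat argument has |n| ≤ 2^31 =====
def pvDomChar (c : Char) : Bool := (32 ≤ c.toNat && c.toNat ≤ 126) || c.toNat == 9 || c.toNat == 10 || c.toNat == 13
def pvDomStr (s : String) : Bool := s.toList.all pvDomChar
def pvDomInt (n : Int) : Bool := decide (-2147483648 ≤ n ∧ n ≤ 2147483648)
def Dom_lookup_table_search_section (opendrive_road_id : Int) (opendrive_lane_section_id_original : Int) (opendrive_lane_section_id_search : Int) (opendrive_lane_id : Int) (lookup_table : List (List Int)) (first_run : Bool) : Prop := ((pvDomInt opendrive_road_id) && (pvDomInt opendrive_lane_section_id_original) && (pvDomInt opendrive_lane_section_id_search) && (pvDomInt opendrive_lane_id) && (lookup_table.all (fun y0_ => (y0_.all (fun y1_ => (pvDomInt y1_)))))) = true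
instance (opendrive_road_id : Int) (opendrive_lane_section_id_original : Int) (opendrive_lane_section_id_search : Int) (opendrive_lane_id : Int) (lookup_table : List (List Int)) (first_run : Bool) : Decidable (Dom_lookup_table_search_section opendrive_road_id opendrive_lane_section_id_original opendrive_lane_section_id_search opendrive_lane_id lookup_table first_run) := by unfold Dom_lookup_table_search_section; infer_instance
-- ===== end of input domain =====

-- B replaces A's per-candidate table rescans (self-recursion gated on first_run) by ONE pass
-- that builds a section -> first-row-index dictionary plus the road's max section; the search
-- and every fallback candidate then become single dictionary lookups.

-- ===== PORT A =====
-- row[k] is ported as PySem.List.pyGetD row k 0: exact under Pre_ (every row has ≥ 3 entries;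
-- Python raises IndexError on a shorter row it touches).
def lttssScan (road orig search lane : Int) : List (List Int) → Int → Option Int
  | [], _ => none
  | row :: rest, counter =>
    let c := counter + 1
    if PySem.List.pyGetD row 0 0 = road then
      if PySem.List.pyGetD row 1 0 = search ∧ PySem.List.pyGetD row 1 0 ≠ orig then
        if PySem.List.pyGetD row 2 0 = lane then some c
        else lttssScan road orig search lane rest c
      else lttssScan road orig search lane rest c
    else lttssScan road orig search lane rest c

def find_max_lane_section (road : Int) (table : List (List Int)) : Int :=
  table.foldl (fun m row =>
    if PySem.List.pyGetD row 0 0 = road then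
      (if PySem.List.pyGetD row 1 0 > m then PySem.List.pyGetD row 1 0 else m)
    else m) 0

mutual
def lookup_table_search_section (opendrive_road_id : Int) (opendrive_lane_section_id_original : Int) (opendrive_lane_section_id_search : Int) (opendrive_lane_id : Int) (lookup_table : List (List Int)) (first_run : Bool) : Option Int :=
  match lttssScan opendrive_road_id opendrive_lane_section_id_original opendrive_lane_section_id_search opendrive_lane_id lookup_table (-1) with
  | some c => some c
  | none =>
    if first_run then
      let maxls := find_max_lane_section opendrive_road_id lookup_table
      -- Python's two sequential `if` branches: with orig < search the second `if` is false, etc.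
      if opendrive_lane_section_id_original < opendrive_lane_section_id_search then
        match lttssTry opendrive_road_id opendrive_lane_section_id_original opendrive_lane_id lookup_table
            (PySem.List.pyRange (opendrive_lane_section_id_search + 1) (maxls + 1) 1) with
        | some r => some r
        | none => lttssTry opendrive_road_id opendrive_lane_section_id_original opendrive_lane_id lookup_table
            (PySem.List.pyRange (opendrive_lane_section_id_search - 1) (-1) (-1))
      else if opendrive_lane_section_id_original > opendrive_lane_section_id_search then
        match lttssTry opendrive_road_id opendrive_lane_section_id_original opendrive_lane_id lookup_table
            (PySem.List.pyRange (opendrive_lane_section_id_search - 1) (-1) (-1)) with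
        | some r => some r
        | none => lttssTry opendrive_road_id opendrive_lane_section_id_original opendrive_lane_id lookup_table
            (PySem.List.pyRange (opendrive_lane_section_id_search + 1) (maxls + 1) 1)
      else none
    else none
  termination_by ((if first_run then 1 else 0 : Nat), (0:Nat))

-- Python's `for i in …: row_number = lookup_table_search_section(…, False); if row_number is not None: return row_number`
def lttssTry (road orig lane : Int) (table : List (List Int)) : List Int → Option Int
  | [] => none
  | i :: rest =>
    match lookup_table_search_section road orig i lane table false with
    | some r => some r
    | none => lttssTry road orig lane table rest
  termination_by l => ((0:Nat), l.length + 1)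
end

-- ===== PORT B =====
-- Source B's single for-loop over enumerate(lookup_table): state = (index dict, max_lane_section)
def lttssLoop (road orig lane : Int) : List (Int × List Int) → (PySem.Dict Int Int × Int) → (PySem.Dict Int Int × Int)
  | [], st => st
  | p :: rest, st =>
    let st' :=
      if PySem.List.pyGetD p.2 0 0 = road then
        let m := if PySem.List.pyGetD p.2 1 0 > st.2 then PySem.List.pyGetD p.2 1 0 else st.2
        let idx :=
          if PySem.List.pyGetD p.2 2 0 = lane ∧ PySem.List.pyGetD p.2 1 0 ≠ orig ∧
              st.1.contains (PySem.List.pyGetD p.2 1 0) = false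
          then st.1.insert (PySem.List.pyGetD p.2 1 0) p.1 else st.1
        (idx, m)
      else st
    lttssLoop road orig lane rest st'

def lookup_table_search_section_alt (opendrive_road_id : Int) (opendrive_lane_section_id_original : Int) (opendrive_lane_section_id_search : Int) (opendrive_lane_id : Int) (lookup_table : List (List Int)) (first_run : Bool) : Option Int :=
  let st := lttssLoop opendrive_road_id opendrive_lane_section_id_original opendrive_lane_id
    (PySem.List.enumerate lookup_table 0) (PySem.Dict.empty, 0)
  match st.1.get? opendrive_lane_section_id_search with
  | some r => some r
  | none =>
    if !first_run then none
    else if opendrive_lane_section_id_original < opendrive_lane_section_id_search then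
      (PySem.List.pyRange (opendrive_lane_section_id_search + 1) (st.2 + 1) 1 ++
        PySem.List.pyRange (opendrive_lane_section_id_search - 1) (-1) (-1)).findSome?
        (fun s => st.1.get? s)
    else if opendrive_lane_section_id_original > opendrive_lane_section_id_search then
      (PySem.List.pyRange (opendrive_lane_section_id_search - 1) (-1) (-1) ++
        PySem.List.pyRange (opendrive_lane_section_id_search + 1) (st.2 + 1) 1).findSome?
        (fun s => st.1.get? s)
    else none

-- ===== PRECONDITION & SPEC =====
-- Pre_ excludes tables with an empty row, or a row of the searched road with fewer than 3 entries:
-- Python A raises IndexError on any such row it inspects (it returns on some of these tables only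
-- when a match precedes the offending row).
def Pre_lookup_table_search_section (opendrive_road_id : Int) (opendrive_lane_section_id_original : Int) (opendrive_lane_section_id_search : Int) (opendrive_lane_id : Int) (lookup_table : List (List Int)) (first_run : Bool) : Prop :=
  ∀ row ∈ lookup_table, 1 ≤ row.length ∧ (PySem.List.pyGetD row 0 0 = opendrive_road_id → 3 ≤ row.length)
instance (opendrive_road_id : Int) (opendrive_lane_section_id_original : Int) (opendrive_lane_section_id_search : Int) (opendrive_lane_id : Int) (lookup_table : List (List Int)) (first_run : Bool) : Decidable (Pre_lookup_table_search_section opendrive_road_id opendrive_lane_section_id_original opendrive_lane_section_id_search opendrive_lane_id lookup_table first_run) := by unfold Pre_lookup_table_search_section; infer_instance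
def pvWitness_lookup_table_search_section : Int × Int × Int × Int × List (List Int) × Bool := (1, 0, 1, 2, [[1, 1, 2]], true)

def Spec_lookup_table_search_section (opendrive_road_id : Int) (opendrive_lane_section_id_original : Int) (opendrive_lane_section_id_search : Int) (opendrive_lane_id : Int) (lookup_table : List (List Int)) (first_run : Bool) (out : Option Int) : Prop := out = lookup_table_search_section_alt opendrive_road_id opendrive_lane_section_id_original opendrive_lane_section_id_search opendrive_lane_id lookup_table first_run
instance (opendrive_road_id : Int) (opendrive_lane_section_id_original : Int) (opendrive_lane_section_id_search : Int) (opendrive_lane_id : Int) (lookup_table : List (List Int)) (first_run : Bool) (out : Option Int) : Decidable (Spec_lookup_table_search_section opendrive_road_id opendrive_lane_section_id_original opendrive_lane_section_id_search opendrive_lane_id lookup_table first_run out) := by unfold Spec_lookup_table_search_section; infer_instance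

-- ===== CLAIM (what is proved, stated in full; the proofs are below) =====
def Claim_equal_lookup_table_search_section : Prop := ∀ (opendrive_road_id : Int) (opendrive_lane_section_id_original : Int) (opendrive_lane_section_id_search : Int) (opendrive_lane_id : Int) (lookup_table : List (List Int)) (first_run : Bool), Dom_lookup_table_search_section opendrive_road_id opendrive_lane_section_id_original opendrive_lane_section_id_search opendrive_lane_id lookup_table first_run → Pre_lookup_table_search_section opendrive_road_id opendrive_lane_section_id_original opendrive_lane_section_id_search opendrive_lane_id lookup_table first_run → Spec_lookup_table_search_section opendrive_road_id opendrive_lane_section_id_original opendrive_lane_section_id_search opendrive_lane_id lookup_table first_run (lookup_table_search_section opendrive_road_id opendrive_lane_section_id_original opendrive_lane_section_id_search opendrive_lane_id lookup_table first_run)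

-- ===== LEMMAS AND PROOFS =====

theorem pvWitness_ok : Dom_lookup_table_search_section (pvWitness_lookup_table_search_section.1) (pvWitness_lookup_table_search_section.2.1) (pvWitness_lookup_table_search_section.2.2.1) (pvWitness_lookup_table_search_section.2.2.2.1) (pvWitness_lookup_table_search_section.2.2.2.2.1) (pvWitness_lookup_table_search_section.2.2.2.2.2) ∧ Pre_lookup_table_search_section (pvWitness_lookup_table_search_section.1) (pvWitness_lookup_table_search_section.2.1) (pvWitness_lookup_table_search_section.2.2.1) (pvWitness_lookup_table_search_section.2.2.2.1) (pvWitness_lookup_table_search_section.2.2.2.2.1) (pvWitness_lookup_table_search_section.2.2.2.2.2) := by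
  constructor <;> decide

-- the "first row matching (road, s, ≠orig, lane)" predicate both proofs meet in the middle on
def lttssPred (road orig s lane : Int) (p : Int × List Int) : Bool :=
  PySem.List.pyGetD p.2 0 0 == road && PySem.List.pyGetD p.2 1 0 == s &&
  PySem.List.pyGetD p.2 1 0 != orig && PySem.List.pyGetD p.2 2 0 == lane

-- A's counter scan (counter c, next row numbered c+1) finds the first matching row's index.
theorem scan_eq (road orig search lane : Int) :
    ∀ (table : List (List Int)) (c : Int),
      lttssScan road orig search lane table c =
        ((PySem.List.enumerate table (c + 1)).find? (lttssPred road orig search lane)).map (·.1) := by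
  intro table
  induction table with
  | nil => intro c; simp [lttssScan, PySem.List.enumerate_nil]
  | cons row rest ih =>
    intro c
    rw [PySem.List.enumerate_cons, List.find?]
    by_cases h0 : PySem.List.pyGetD row 0 0 = road
    · by_cases h1 : PySem.List.pyGetD row 1 0 = search ∧ PySem.List.pyGetD row 1 0 ≠ orig
      · by_cases h2 : PySem.List.pyGetD row 2 0 = lane
        · have hne : search ≠ orig := h1.1 ▸ h1.2
          have hbne : (search != orig) = true := by simp [hne]
          simp [lttssScan, lttssPred, h0, h1.1, h2, hne, hbne]
        · have hb : lttssPred road orig search lane (c + 1, row) = false := by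
            simp [lttssPred, h2]
          simp only [lttssScan, if_pos h0, if_pos h1, if_neg h2, hb]
          rw [ih (c + 1)]
      · have hb : lttssPred road orig search lane (c + 1, row) = false := by
          simp only [not_and_or, not_not] at h1
          rcases h1 with h | h <;> simp [lttssPred, h]
        simp only [lttssScan, if_pos h0, if_neg h1, hb]
        rw [ih (c + 1)]
    · have hb : lttssPred road orig search lane (c + 1, row) = false := by
        simp [lttssPred, h0]
      simp only [lttssScan, if_neg h0, hb]
      rw [ih (c + 1)]

-- B's one-pass dictionary: looking up s gives the first matching row's index (first-wins insert).
theorem loop_get (road orig lane s : Int) :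
    ∀ (l : List (Int × List Int)) (d : PySem.Dict Int Int) (m : Int),
      (lttssLoop road orig lane l (d, m)).1.get? s =
        (d.get? s).or ((l.find? (lttssPred road orig s lane)).map (·.1)) := by
  intro l
  induction l with
  | nil => intro d m; simp [lttssLoop]
  | cons p rest ih =>
    intro d m
    rw [lttssLoop, List.find?]
    by_cases h0 : PySem.List.pyGetD p.2 0 0 = road
    · simp only [if_pos h0]
      by_cases hc : PySem.List.pyGetD p.2 2 0 = lane ∧ PySem.List.pyGetD p.2 1 0 ≠ orig ∧
          d.contains (PySem.List.pyGetD p.2 1 0) = false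
      · simp only [if_pos hc]
        rw [ih]
        by_cases hs : s = PySem.List.pyGetD p.2 1 0
        · subst hs
          have hdn : d.get? (PySem.List.pyGetD p.2 1 0) = none := by
            rcases hn : d.get? (PySem.List.pyGetD p.2 1 0) with _ | v
            · rfl
            · exfalso
              have := hc.2.2
              rw [PySem.Dict.contains_eq_isSome_get?, hn] at this
              simp at this
          have hp : lttssPred road orig (PySem.List.pyGetD p.2 1 0) lane p = true := by
            simp [lttssPred, h0, hc.1, hc.2.1]
          simp [PySem.Dict.get?_insert_self, hdn, hp]
        · have hp : lttssPred road orig s lane p = false := by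
            simp only [lttssPred]
            have hb : (PySem.List.pyGetD p.2 1 0 == s) = false := by
              simp only [beq_eq_false_iff_ne]
              first
              | exact fun h => hs h
              | exact fun h => hs h.symm
            simp [hb]
          rw [PySem.Dict.get?_insert_of_ne]
          · rw [hp]
          · first
            | exact fun h => hs h
            | exact fun h => hs h.symm
      · simp only [if_neg hc]
        rw [ih]
        rcases hd : d.get? s with _ | v
        · -- d has no entry for s; show this row cannot match either
          have hp : lttssPred road orig s lane p = false := by
            simp only [not_and_or, not_not, Bool.not_eq_false] at hc
            rcases hc with h | h | h
            · simp [lttssPred, h]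
            · by_cases hs : PySem.List.pyGetD p.2 1 0 = s
              · simp [lttssPred, hs ▸ h]
              · simp [lttssPred, hs]
            · by_cases hs : PySem.List.pyGetD p.2 1 0 = s
              · exfalso
                rw [PySem.Dict.contains_eq_isSome_get?, hs, hd] at h
                simp at h
              · simp [lttssPred, hs]
          rw [hp]
        · simp
    · have hp : lttssPred road orig s lane p = false := by simp [lttssPred, h0]
      simp only [if_neg h0, hp]
      exact ih d m
-- B's running maximum equals A's find_max_lane_section.
theorem loop_max (road orig lane : Int) :
    ∀ (table : List (List Int)) (k : Int) (d : PySem.Dict Int Int) (m : Int),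
      (lttssLoop road orig lane (PySem.List.enumerate table k) (d, m)).2 =
        table.foldl (fun m row =>
          if PySem.List.pyGetD row 0 0 = road then
            (if PySem.List.pyGetD row 1 0 > m then PySem.List.pyGetD row 1 0 else m)
          else m) m := by
  intro table
  induction table with
  | nil => intro k d m; simp [PySem.List.enumerate_nil, lttssLoop]
  | cons row rest ih =>
    intro k d m
    rw [PySem.List.enumerate_cons, lttssLoop, List.foldl]
    by_cases h0 : PySem.List.pyGetD row 0 0 = road
    · simp only [if_pos h0]
      split_ifs with hg <;> apply ih
    · simp only [if_neg h0]
      apply ih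

-- A's recursive call with first_run=False is exactly one dictionary lookup in B's index.
theorem call_false_eq (road orig i lane : Int) (table : List (List Int)) :
    lookup_table_search_section road orig i lane table false =
      (lttssLoop road orig lane (PySem.List.enumerate table 0) (PySem.Dict.empty, 0)).1.get? i := by
  rw [lookup_table_search_section]
  have h := scan_eq road orig i lane table (-1)
  norm_num at h
  rw [h, loop_get]
  cases hf : ((PySem.List.enumerate table 0).find? _) <;> simp

theorem try_eq (road orig lane : Int) (table : List (List Int)) :
    ∀ l : List Int, lttssTry road orig lane table l =
      l.findSome? (fun s => (lttssLoop road orig lane (PySem.List.enumerate table 0) (PySem.Dict.empty, 0)).1.get? s) := by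
  intro l
  induction l with
  | nil => rw [lttssTry]; simp
  | cons i rest ih =>
    rw [lttssTry, call_false_eq, List.findSome?]
    cases h : (lttssLoop road orig lane (PySem.List.enumerate table 0) (PySem.Dict.empty, 0)).1.get? i <;>
      simp [h, ih]

-- ===== VERDICT (by name: the statement is the Claim_ definition above) =====
theorem lookup_table_search_section_spec : Claim_equal_lookup_table_search_section := by
  intro road orig search lane table first_run _ _
  unfold Spec_lookup_table_search_section
  rw [lookup_table_search_section, lookup_table_search_section_alt]
  have hget : lttssScan road orig search lane table (-1) =
      (lttssLoop road orig lane (PySem.List.enumerate table 0) (PySem.Dict.empty, 0)).1.get? search := by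
    have h := scan_eq road orig search lane table (-1)
    norm_num at h
    rw [h, loop_get]
    cases hf : ((PySem.List.enumerate table 0).find? _) <;> simp
  have hmax : find_max_lane_section road table =
      (lttssLoop road orig lane (PySem.List.enumerate table 0) (PySem.Dict.empty, 0)).2 := by
    rw [find_max_lane_section, loop_max]
  rw [hget]
  cases hf : (lttssLoop road orig lane (PySem.List.enumerate table 0) (PySem.Dict.empty, 0)).1.get? search with
  | some p => rfl
  | none =>
    cases first_run with
    | false => simp
    | true =>
      simp only [Bool.not_true, Bool.false_eq_true, if_false]
      rw [if_pos (by trivial), hmax]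
      split_ifs with hlt hgt
      · rw [try_eq, try_eq, List.findSome?_append]
        rcases hx : List.findSome? (fun s => (lttssLoop road orig lane (PySem.List.enumerate table 0) (PySem.Dict.empty, 0)).1.get? s)
            (PySem.List.pyRange (search + 1) ((lttssLoop road orig lane (PySem.List.enumerate table 0) (PySem.Dict.empty, 0)).2 + 1) 1)
          with _ | r <;> simp [hx]
      · rw [try_eq, try_eq, List.findSome?_append]
        rcases hx : List.findSome? (fun s => (lttssLoop road orig lane (PySem.List.enumerate table 0) (PySem.Dict.empty, 0)).1.get? s)
            (PySem.List.pyRange (search - 1) (-1) (-1))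
          with _ | r <;> simp [hx]
      · rfl
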